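-- pv_equiv track=rewrite | github.com/maemreyo/glean-vault | glean/99_Tools/scripts/phase_tagging.py | get_phase_mapping
-- ===== SOURCE A (Python) =====
-- def get_phase_mapping(base_tag):
--     """
--     Returns a dictionary mapping card numbers to the full tag string.
--     Phases:
--     1. Foundation: 1, 10
--     2. Activation: 2, 3, 4
--     3. Differentiation: 6, 11, 12
--     4. Mastery: 5, 7, 8
--     5. Addition: 9
--     """
--     phases = {
--         '01-foundation': [1, 10],
--         '02-activation': [2, 3, 4],
--         '03-differentiation': [6, 11, 12],
--         '04-mastery': [5, 7, 8],
--         '05-addition': [9]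
--     }
--
--     card_map = {}
--     for phase_suffix, card_nums in phases.items():
--         full_tag = f"{base_tag}/{phase_suffix}"
--         for card_num in card_nums:
--             card_map[card_num] = full_tag
--
--     return card_map
-- ===== SOURCE B (Python) =====
-- def get_phase_mapping(base_tag):
--     """Same mapping built from a flat card->phase-suffix table in one pass."""
--     table = [
--         (1, '01-foundation'), (10, '01-foundation'),
--         (2, '02-activation'), (3, '02-activation'), (4, '02-activation'),
--         (6, '03-differentiation'), (11, '03-differentiation'), (12, '03-differentiation'),
--         (5, '04-mastery'), (7, '04-mastery'), (8, '04-mastery'),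
--         (9, '05-addition'),
--     ]
--     return {card: f"{base_tag}/{suffix}" for card, suffix in table}
-- ===== Notes on version B (the rewrite author's own statement) =====
-- stated objective: simpler
-- what changed: Replaces the phase->card-list dict and nested loops with a flat inverted card->suffix table read in a single comprehension.
import Mathlib
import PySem

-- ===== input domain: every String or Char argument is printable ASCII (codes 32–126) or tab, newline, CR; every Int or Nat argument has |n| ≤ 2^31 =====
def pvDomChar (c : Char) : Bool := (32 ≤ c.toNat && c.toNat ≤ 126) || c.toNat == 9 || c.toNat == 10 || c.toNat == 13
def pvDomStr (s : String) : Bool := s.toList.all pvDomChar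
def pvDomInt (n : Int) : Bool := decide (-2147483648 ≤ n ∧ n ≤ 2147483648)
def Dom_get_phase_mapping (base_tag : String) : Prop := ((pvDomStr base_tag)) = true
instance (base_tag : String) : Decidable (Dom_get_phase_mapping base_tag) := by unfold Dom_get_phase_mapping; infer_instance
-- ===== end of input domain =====

-- B replaces A's phase->cards dict and nested loops by a flat inverted card->suffix table
-- read in one pass (objective: simpler). Return-value equivalence; no mutation involved.

-- ===== PORT A =====
def get_phase_mapping (base_tag : String) : List (Int × String) :=
  let phases : List (String × List Int) :=
    [("01-foundation", [1, 10]),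
     ("02-activation", [2, 3, 4]),
     ("03-differentiation", [6, 11, 12]),
     ("04-mastery", [5, 7, 8]),
     ("05-addition", [9])]
  let card_map : PySem.Dict Int String :=
    phases.foldl (fun d p =>
      let full_tag := base_tag ++ "/" ++ p.1
      p.2.foldl (fun d card_num => d.insert card_num full_tag) d) PySem.Dict.empty
  card_map.items

-- ===== PORT B =====
def get_phase_mapping_alt (base_tag : String) : List (Int × String) :=
  let table : List (Int × String) :=
    [(1, "01-foundation"), (10, "01-foundation"),
     (2, "02-activation"), (3, "02-activation"), (4, "02-activation"),
     (6, "03-differentiation"), (11, "03-differentiation"), (12, "03-differentiation"),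
     (5, "04-mastery"), (7, "04-mastery"), (8, "04-mastery"),
     (9, "05-addition")]
  table.map (fun p => (p.1, base_tag ++ "/" ++ p.2))

-- ===== PRECONDITION & SPEC =====
def Spec_get_phase_mapping (base_tag : String) (out : List (Int × String)) : Prop := out = get_phase_mapping_alt base_tag
instance (base_tag : String) (out : List (Int × String)) : Decidable (Spec_get_phase_mapping base_tag out) := by unfold Spec_get_phase_mapping; infer_instance

-- ===== CLAIM (what is proved, stated in full; the proofs are below) =====
def Claim_equal_get_phase_mapping : Prop := ∀ (base_tag : String), Dom_get_phase_mapping base_tag → Spec_get_phase_mapping base_tag (get_phase_mapping base_tag)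

-- ===== LEMMAS AND PROOFS =====

-- ===== VERDICT (by name: the statement is the Claim_ definition above) =====
theorem get_phase_mapping_spec : Claim_equal_get_phase_mapping := by
  intro base_tag _
  unfold Spec_get_phase_mapping get_phase_mapping get_phase_mapping_alt
  simp [PySem.Dict.insert, PySem.Dict.empty, PySem.Dict.contains, List.foldl]
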